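-- pv_equiv track=rewrite | github.com/Aaavii/weather_impact_team2 | data_extraction.py | pick_station_for_icao
-- ===== SOURCE A (Python) =====
-- YEARS = range(2019, 2025)
--
-- def pick_station_for_icao(rows, icao):
--     # Filter rows that match ICAO and have any overlap with our requested years
--     candidates = []
--     y_min, y_max = min(YEARS), max(YEARS)
--     for row in rows:
--         if row.get("ICAO", "").strip().upper() != icao:
--             continue
--         # Parse begin/end as YYYYMMDD (may be blank)
--         def parse(x):
--             if not x: return 0, 0, 0
--             try:
--                 return int(x[0:4]), int(x[4:6]), int(x[6:8])
--             except:
--                 return 0, 0, 0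
--         by, _, _ = parse(row.get("BEGIN", ""))
--         ey, _, _ = parse(row.get("END", ""))
--         if ey == 0:  # still active
--             ey = 9999
--         # Overlaps our target years?
--         if not (ey < y_min or by > y_max):
--             candidates.append(row)
--
--     if not candidates:
--         return None
--
--     # Prefer the one with latest END year (most recent/active), then USAF present, WBAN present
--     def keyfun(r):
--         end = r.get("END", "")
--         endy = int(end[:4]) if end and end[:4].isdigit() else 9999
--         begin = r.get("BEGIN", "")
--         beginy = int(begin[:4]) if begin and begin[:4].isdigit() else 0
--         return (endy, beginy)
--
--     best = sorted(candidates, key=keyfun, reverse=True)[0]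
--     usaf = (best.get("USAF", "") or "").strip().zfill(6)
--     wban = (best.get("WBAN", "") or "").strip().zfill(5)
--     if not (usaf.isdigit() and wban.isdigit()):
--         return None
--     station_id = f"{usaf}{wban}"  # IMPORTANT: no dash in filename
--     return {
--         "icao": icao,
--         "usaf": usaf,
--         "wban": wban,
--         "station_id": station_id,
--         "name": best.get("STATION_NAME", "").strip(),
--         "begin": best.get("BEGIN", ""),
--         "end": best.get("END", ""),
--     }
-- ===== SOURCE B (Python) =====
-- YEARS = range(2019, 2025)
--
--
-- def _parse_year(x):
--     # First component of A's YYYYMMDD parse: the year, but only when all three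
--     # int() conversions of the slices succeed; otherwise (or for empty x) 0.
--     if not x:
--         return 0
--     try:
--         y = int(x[0:4])
--         int(x[4:6])
--         int(x[6:8])
--         return y
--     except Exception:
--         return 0
--
--
-- def _rank(row):
--     # (end-year, begin-year) preference key; missing/non-digit END counts as 9999.
--     end = row.get("END", "")
--     begin = row.get("BEGIN", "")
--     endy = int(end[:4]) if end[:4].isdigit() else 9999
--     beginy = int(begin[:4]) if begin[:4].isdigit() else 0
--     return endy, beginy
--
--
-- def pick_station_for_icao(rows, icao):
--     # Single fused pass: no candidates list, no sort; keep the first row whose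
--     # key is strictly greater than the best so far (first maximum wins, which
--     # is what the stable reverse sort's head is).
--     best_key = None
--     best_row = None
--     for row in rows:
--         if row.get("ICAO", "").strip().upper() != icao:
--             continue
--         by = _parse_year(row.get("BEGIN", ""))
--         ey = _parse_year(row.get("END", "")) or 9999  # 0 means still active
--         if ey < min(YEARS) or by > max(YEARS):
--             continue
--         k = _rank(row)
--         if best_key is None or k > best_key:
--             best_key, best_row = k, row
--     if best_row is None:
--         return None
--     usaf = best_row.get("USAF", "").strip().zfill(6)
--     wban = best_row.get("WBAN", "").strip().zfill(5)
--     if not (usaf.isdigit() and wban.isdigit()):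
--         return None
--     return {
--         "icao": icao,
--         "usaf": usaf,
--         "wban": wban,
--         "station_id": usaf + wban,
--         "name": best_row.get("STATION_NAME", "").strip(),
--         "begin": best_row.get("BEGIN", ""),
--         "end": best_row.get("END", ""),
--     }
-- ===== Notes on version B (the rewrite author's own statement) =====
-- stated objective: alternative
-- what changed: B fuses filtering, keying and selection into one pass that keeps the strictly-best (end-year, begin-year) row seen so far, instead of A's building a candidates list and stable reverse-sorting it to take the head; B also never builds or sorts any intermediate list.
import Mathlib
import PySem

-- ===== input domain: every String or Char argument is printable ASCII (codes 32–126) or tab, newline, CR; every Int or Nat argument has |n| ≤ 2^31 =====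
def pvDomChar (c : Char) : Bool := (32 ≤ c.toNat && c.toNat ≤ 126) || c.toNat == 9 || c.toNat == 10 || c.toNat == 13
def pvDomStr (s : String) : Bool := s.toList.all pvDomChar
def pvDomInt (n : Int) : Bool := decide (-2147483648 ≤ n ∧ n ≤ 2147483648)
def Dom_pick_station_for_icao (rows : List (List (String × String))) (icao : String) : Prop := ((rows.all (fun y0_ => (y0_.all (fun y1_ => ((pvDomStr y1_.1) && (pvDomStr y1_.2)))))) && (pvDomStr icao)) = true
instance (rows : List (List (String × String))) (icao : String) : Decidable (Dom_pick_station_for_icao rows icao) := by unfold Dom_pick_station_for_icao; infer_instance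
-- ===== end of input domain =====

-- B replaces A's candidate-list + stable reverse sort by one fused pass keeping the
-- strictly-best-so-far row (first maximum wins); same return value, no mutation.

-- ===== PORT A =====

-- row.get(k, "")  (a row is a dict ported as an association list; first match)
def pvGet (row : List (String × String)) (k : String) : String :=
  (PySem.Dict.mk row).getD k ""

-- A's inner parse(x): int(x[0:4]), int(x[4:6]), int(x[6:8]) under try/except
def pvParseA (x : String) : Int × Int × Int :=
  if x = "" then (0, 0, 0)
  else
    match PySem.Int.ofStr? (PySem.Str.slice x (some 0) (some 4)),
          PySem.Int.ofStr? (PySem.Str.slice x (some 4) (some 6)),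
          PySem.Int.ofStr? (PySem.Str.slice x (some 6) (some 8)) with
    | some a, some b, some c => (a, b, c)
    | _, _, _ => (0, 0, 0)

-- A's keyfun(r) = (endy, beginy)
def pvKeyfunA (r : List (String × String)) : Int × Int :=
  let endS := pvGet r "END"
  let endy : Int :=
    if endS ≠ "" ∧ PySem.Str.strIsdigit (PySem.Str.slice endS none (some 4)) then
      (PySem.Int.ofStr? (PySem.Str.slice endS none (some 4))).getD 0
    else 9999
  let beginS := pvGet r "BEGIN"
  let beginy : Int :=
    if beginS ≠ "" ∧ PySem.Str.strIsdigit (PySem.Str.slice beginS none (some 4)) then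
      (PySem.Int.ofStr? (PySem.Str.slice beginS none (some 4))).getD 0
    else 0
  (endy, beginy)

-- the tail both Pythons share verbatim: USAF/WBAN validation and the result dict
-- (`best.get("USAF","") or ""` is the row value itself, since the .get default is already "")
def pvFinish (best : List (String × String)) (icao : String) : Option (List (String × String)) :=
  let usaf := PySem.Str.zfill (PySem.Str.strip (pvGet best "USAF")) 6
  let wban := PySem.Str.zfill (PySem.Str.strip (pvGet best "WBAN")) 5
  if PySem.Str.strIsdigit usaf && PySem.Str.strIsdigit wban then
    some [("icao", icao), ("usaf", usaf), ("wban", wban),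
          ("station_id", PySem.Str.join "" [usaf, wban]),
          ("name", PySem.Str.strip (pvGet best "STATION_NAME")),
          ("begin", pvGet best "BEGIN"), ("end", pvGet best "END")]
  else none

def pick_station_for_icao (rows : List (List (String × String))) (icao : String) : Option (List (String × String)) :=
  let y_min := (PySem.List.min? (PySem.List.pyRange 2019 2025 1) (fun y => y)).getD 0
  let y_max := (PySem.List.max? (PySem.List.pyRange 2019 2025 1) (fun y => y)).getD 0
  let candidates := rows.foldl (fun acc row =>
    if PySem.Str.upper (PySem.Str.strip (pvGet row "ICAO")) ≠ icao then acc
    else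
      let bY := (pvParseA (pvGet row "BEGIN")).1
      let eY0 := (pvParseA (pvGet row "END")).1
      let eY := if eY0 = 0 then 9999 else eY0
      if ¬ (eY < y_min ∨ bY > y_max) then acc ++ [row] else acc) []
  if candidates = [] then none
  else
    match PySem.List.sorted2 candidates (fun r => (pvKeyfunA r).1) (fun r => (pvKeyfunA r).2) true with
    | [] => none
    | best :: _ => pvFinish best icao

-- ===== PORT B =====

-- B's _parse_year(x): the year component, 0 unless all three int() conversions succeed
def pvParseYearB (x : String) : Int :=
  if x = "" then 0
  else
    match PySem.Int.ofStr? (PySem.Str.slice x (some 0) (some 4)),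
          PySem.Int.ofStr? (PySem.Str.slice x (some 4) (some 6)),
          PySem.Int.ofStr? (PySem.Str.slice x (some 6) (some 8)) with
    | some y, some _, some _ => y
    | _, _, _ => 0

-- B's _rank(row)
def pvRankB (r : List (String × String)) : Int × Int :=
  let endS := pvGet r "END"
  let beginS := pvGet r "BEGIN"
  let endy : Int :=
    if PySem.Str.strIsdigit (PySem.Str.slice endS none (some 4)) then
      (PySem.Int.ofStr? (PySem.Str.slice endS none (some 4))).getD 0
    else 9999
  let beginy : Int :=
    if PySem.Str.strIsdigit (PySem.Str.slice beginS none (some 4)) then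
      (PySem.Int.ofStr? (PySem.Str.slice beginS none (some 4))).getD 0
    else 0
  (endy, beginy)

-- the loop body of B's single pass: best is None or (best_key, best_row)
def pvStepB (icao : String) (best : Option ((Int × Int) × List (String × String)))
    (row : List (String × String)) : Option ((Int × Int) × List (String × String)) :=
  if PySem.Str.upper (PySem.Str.strip (pvGet row "ICAO")) ≠ icao then best
  else
    let bY := pvParseYearB (pvGet row "BEGIN")
    let eY0 := pvParseYearB (pvGet row "END")
    let eY := if eY0 = 0 then 9999 else eY0   -- `or 9999`
    if eY < (PySem.List.min? (PySem.List.pyRange 2019 2025 1) (fun y => y)).getD 0 ∨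
       bY > (PySem.List.max? (PySem.List.pyRange 2019 2025 1) (fun y => y)).getD 0 then best
    else
      let k := pvRankB row
      match best with
      | none => some (k, row)
      | some (bk, br) =>     -- Python tuple compare k > best_key, lexicographic
        if k.1 > bk.1 ∨ (k.1 = bk.1 ∧ k.2 > bk.2) then some (k, row) else some (bk, br)

def pick_station_for_icao_alt (rows : List (List (String × String))) (icao : String) : Option (List (String × String)) :=
  match rows.foldl (pvStepB icao) none with
  | none => none
  | some (_, best_row) => pvFinish best_row icao

-- ===== PRECONDITION & SPEC =====
def Spec_pick_station_for_icao (rows : List (List (String × String))) (icao : String) (out : Option (List (String × String))) : Prop := out = pick_station_for_icao_alt rows icao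
instance (rows : List (List (String × String))) (icao : String) (out : Option (List (String × String))) : Decidable (Spec_pick_station_for_icao rows icao out) := by unfold Spec_pick_station_for_icao; infer_instance

-- ===== CLAIM (what is proved, stated in full; the proofs are below) =====
def Claim_equal_pick_station_for_icao : Prop := ∀ (rows : List (List (String × String))) (icao : String), Dom_pick_station_for_icao rows icao → Spec_pick_station_for_icao rows icao (pick_station_for_icao rows icao)

-- ===== LEMMAS AND PROOFS =====

-- the common filter test: ICAO matches and the parsed years overlap 2019..2024
def pvQual (icao : String) (row : List (String × String)) : Bool :=
  !decide (PySem.Str.upper (PySem.Str.strip (pvGet row "ICAO")) ≠ icao) &&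
  !decide ((if pvParseYearB (pvGet row "END") = 0 then 9999 else pvParseYearB (pvGet row "END")) < 2019 ∨
           pvParseYearB (pvGet row "BEGIN") > 2024)

-- the key-free form of B's update
def pvUpdRow (best : Option (List (String × String))) (row : List (String × String)) :
    Option (List (String × String)) :=
  match best with
  | none => some row
  | some b =>
    if (pvRankB row).1 > (pvRankB b).1 ∨ ((pvRankB row).1 = (pvRankB b).1 ∧ (pvRankB row).2 > (pvRankB b).2) then
      some row
    else some b

-- the comparison sorted2's reverse insertion uses, named
def pvBefore (a b : List (String × String)) : Bool :=
  decide ((pvRankB b).1 < (pvRankB a).1) ||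
    (!decide ((pvRankB a).1 < (pvRankB b).1) && decide ((pvRankB b).2 < (pvRankB a).2))

lemma pvParseYear_eq (x : String) : (pvParseA x).1 = pvParseYearB x := by
  unfold pvParseA pvParseYearB
  split
  · rfl
  · cases PySem.Int.ofStr? (PySem.Str.slice x (some 0) (some 4)) <;>
    cases PySem.Int.ofStr? (PySem.Str.slice x (some 4) (some 6)) <;>
    cases PySem.Int.ofStr? (PySem.Str.slice x (some 6) (some 8)) <;> rfl

lemma pvKeyfun_eq_rank (r : List (String × String)) : pvKeyfunA r = pvRankB r := by
  unfold pvKeyfunA pvRankB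
  by_cases he : pvGet r "END" = ""
  · by_cases hb : pvGet r "BEGIN" = "" <;> simp [he, hb] <;> decide
  · by_cases hb : pvGet r "BEGIN" = "" <;> simp [he, hb] <;> decide

lemma pv_ymin : (PySem.List.min? (PySem.List.pyRange 2019 2025 1) (fun y => y)).getD 0 = 2019 := by decide

lemma pv_ymax : (PySem.List.max? (PySem.List.pyRange 2019 2025 1) (fun y => y)).getD 0 = 2024 := by decide

lemma pvCandidates_eq (rows : List (List (String × String))) (icao : String) :
    rows.foldl (fun acc row =>
      if PySem.Str.upper (PySem.Str.strip (pvGet row "ICAO")) ≠ icao then acc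
      else
        let bY := (pvParseA (pvGet row "BEGIN")).1
        let eY0 := (pvParseA (pvGet row "END")).1
        let eY := if eY0 = 0 then 9999 else eY0
        if ¬ (eY < (PySem.List.min? (PySem.List.pyRange 2019 2025 1) (fun y => y)).getD 0 ∨
              bY > (PySem.List.max? (PySem.List.pyRange 2019 2025 1) (fun y => y)).getD 0) then acc ++ [row] else acc) []
    = rows.filter (pvQual icao) := by
  rw [PySem.List.foldl_congr_mem _ _
    (fun acc row => if pvQual icao row = true then acc ++ [row] else acc) _ ?_]
  · rw [PySem.List.foldl_append_if_eq_filter]; simp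
  · intro acc row _
    simp only [pvQual, pv_ymin, pv_ymax, pvParseYear_eq]
    by_cases h1 : PySem.Str.upper (PySem.Str.strip (pvGet row "ICAO")) ≠ icao
    · simp [h1]
    · by_cases h2 : (if pvParseYearB (pvGet row "END") = 0 then (9999:Int) else pvParseYearB (pvGet row "END")) < 2019 ∨
          pvParseYearB (pvGet row "BEGIN") > 2024 <;> simp [h1, h2]

lemma pvStepB_eq (icao : String) (best : Option ((Int × Int) × List (String × String)))
    (row : List (String × String)) :
    pvStepB icao best row =
      if pvQual icao row = true then
        (match best with
          | none => some (pvRankB row, row)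
          | some (bk, br) =>
            if (pvRankB row).1 > bk.1 ∨ ((pvRankB row).1 = bk.1 ∧ (pvRankB row).2 > bk.2) then
              some (pvRankB row, row)
            else some (bk, br))
      else best := by
  simp only [pvStepB, pvQual, pv_ymin, pv_ymax]
  by_cases h1 : PySem.Str.upper (PySem.Str.strip (pvGet row "ICAO")) ≠ icao
  · simp [h1]
  · by_cases h2 : (if pvParseYearB (pvGet row "END") = 0 then (9999:Int) else pvParseYearB (pvGet row "END")) < 2019 ∨
        pvParseYearB (pvGet row "BEGIN") > 2024 <;> simp [h1, h2]

lemma pvFoldB_map (l : List (List (String × String))) :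
    ∀ b : Option (List (String × String)),
      l.foldl (fun best row =>
          match best with
          | none => some (pvRankB row, row)
          | some (bk, br) =>
            if (pvRankB row).1 > bk.1 ∨ ((pvRankB row).1 = bk.1 ∧ (pvRankB row).2 > bk.2) then
              some (pvRankB row, row)
            else some (bk, br)) (b.map (fun r => (pvRankB r, r)))
      = (l.foldl pvUpdRow b).map (fun r => (pvRankB r, r)) := by
  induction l with
  | nil => intro b; rfl
  | cons r l ih =>
    intro b
    have h : (match b.map (fun r => (pvRankB r, r)) with
        | none => some (pvRankB r, r)
        | some (bk, br) =>
          if (pvRankB r).1 > bk.1 ∨ ((pvRankB r).1 = bk.1 ∧ (pvRankB r).2 > bk.2) then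
            some (pvRankB r, r)
          else some (bk, br))
        = (pvUpdRow b r).map (fun r => (pvRankB r, r)) := by
      cases b with
      | none => rfl
      | some b0 =>
        simp only [Option.map_some, pvUpdRow]
        split <;> simp
    simp only [List.foldl_cons, h, ih]

lemma pvHead_insertBy {α : Type} (before : α → α → Bool) (x : α) (ys : List α) :
    (PySem.List.insertBy before x ys).head? =
      some (match ys with | [] => x | y :: _ => if before x y then x else y) := by
  cases ys with
  | nil => rfl
  | cons y t => simp only [PySem.List.insertBy]; split <;> simp

lemma pvBefore_eq (a b : List (String × String)) :
    pvBefore a b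
    = decide ((pvRankB a).1 > (pvRankB b).1 ∨ ((pvRankB a).1 = (pvRankB b).1 ∧ (pvRankB a).2 > (pvRankB b).2)) := by
  unfold pvBefore
  rw [Bool.eq_iff_iff]
  simp only [Bool.or_eq_true, Bool.and_eq_true, Bool.not_eq_true', decide_eq_true_eq,
    decide_eq_false_iff_not]
  omega

lemma pvSorted2_eq (m : List (List (String × String))) :
    PySem.List.sorted2 m (fun r => (pvRankB r).1) (fun r => (pvRankB r).2) true
      = m.foldl (fun acc x => PySem.List.insertBy pvBefore x acc) [] := rfl

lemma pvHead_sorted2 (l : List (List (String × String))) :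
    (PySem.List.sorted2 l (fun r => (pvRankB r).1) (fun r => (pvRankB r).2) true).head?
      = l.foldl pvUpdRow none := by
  induction l using List.reverseRecOn with
  | nil => rfl
  | append_singleton l x ih =>
    rw [pvSorted2_eq, List.foldl_append, List.foldl_cons, List.foldl_nil, pvHead_insertBy,
        ← pvSorted2_eq, List.foldl_append, List.foldl_cons, List.foldl_nil]
    cases hs : PySem.List.sorted2 l (fun r => (pvRankB r).1) (fun r => (pvRankB r).2) true with
    | nil =>
      rw [hs] at ih
      simp only [List.head?_nil] at ih
      simp [← ih, pvUpdRow]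
    | cons y t =>
      rw [hs] at ih
      simp only [List.head?_cons] at ih
      simp only [← ih, pvUpdRow]
      rw [pvBefore_eq x y]
      by_cases h : (pvRankB x).1 > (pvRankB y).1 ∨ ((pvRankB x).1 = (pvRankB y).1 ∧ (pvRankB x).2 > (pvRankB y).2) <;>
        simp [h]

lemma pvUpdRow_some (b0 x : List (String × String)) :
    ∃ r, pvUpdRow (some b0) x = some r := by
  by_cases h : (pvRankB x).1 > (pvRankB b0).1 ∨ ((pvRankB x).1 = (pvRankB b0).1 ∧ (pvRankB x).2 > (pvRankB b0).2)
  · exact ⟨x, by simp [pvUpdRow, h]⟩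
  · exact ⟨b0, by simp [pvUpdRow, h]⟩

lemma pvFold_ne_none (l : List (List (String × String))) (b0 : List (String × String)) :
    ∃ r, l.foldl pvUpdRow (some b0) = some r := by
  induction l generalizing b0 with
  | nil => exact ⟨b0, rfl⟩
  | cons x l ih =>
    rw [List.foldl_cons]
    obtain ⟨r, hr⟩ := pvUpdRow_some b0 x
    rw [hr]
    exact ih r

-- ===== VERDICT (by name: the statement is the Claim_ definition above) =====
theorem pick_station_for_icao_spec : Claim_equal_pick_station_for_icao := by
  intro rows icao _
  unfold Spec_pick_station_for_icao pick_station_for_icao pick_station_for_icao_alt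
  simp only [pvCandidates_eq]
  rw [PySem.List.foldl_congr_mem _ _
    (fun best row =>
      if pvQual icao row = true then
        (match best with
          | none => some (pvRankB row, row)
          | some (bk, br) =>
            if (pvRankB row).1 > bk.1 ∨ ((pvRankB row).1 = bk.1 ∧ (pvRankB row).2 > bk.2) then
              some (pvRankB row, row)
            else some (bk, br))
      else best) none (by intro acc row _; exact pvStepB_eq icao acc row)]
  rw [PySem.List.foldl_if_eq_foldl_filter]
  have hmap := pvFoldB_map (rows.filter (pvQual icao)) none
  simp only [Option.map_none] at hmap
  rw [hmap]
  have hkey : (fun r => (pvKeyfunA r).1) = (fun r => (pvRankB r).1) := by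
    funext r; rw [pvKeyfun_eq_rank]
  have hkey2 : (fun r => (pvKeyfunA r).2) = (fun r => (pvRankB r).2) := by
    funext r; rw [pvKeyfun_eq_rank]
  rw [hkey, hkey2]
  cases hf : rows.filter (pvQual icao) with
  | nil => simp
  | cons r rest =>
    have hne : (r :: rest) ≠ ([] : List (List (String × String))) := by simp
    simp only [if_neg hne]
    have hhead := pvHead_sorted2 (r :: rest)
    rw [List.foldl_cons] at hhead ⊢
    have hu : pvUpdRow none r = some r := rfl
    rw [hu] at hhead ⊢
    obtain ⟨best, hbest⟩ := pvFold_ne_none rest r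
    rw [hbest] at hhead ⊢
    cases hsort : PySem.List.sorted2 (r :: rest) (fun r => (pvRankB r).1) (fun r => (pvRankB r).2) true with
    | nil => rw [hsort] at hhead; simp at hhead
    | cons b t =>
      rw [hsort] at hhead
      simp only [List.head?_cons, Option.some.injEq] at hhead
      simp [hhead]
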